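-- pv_equiv track=rewrite | github.com/tiny451th/JOOD | utils/strings.py | concat_words_x
-- ===== SOURCE A (Python) =====
-- def concat_words_x(word1, word2):
--     # Determine the size of the grid based on the longer word
--     max_len = max(len(word1), len(word2))
--
--     # Initialize a grid with spaces
--     grid = [[' ' for _ in range(max_len)] for _ in range(max_len)]
--
--     # Place word2 ("BOMB") on the top-right to bottom-left diagonal
--     for i in range(len(word2)):
--         grid[i][max_len - 1 - i] = word2[i]
--
--     # Place word1 ("APPLE") on the top-left to bottom-right diagonal
--     for i in range(len(word1)):
--         grid[i][i] = word1[i]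
--
--     # Combine the grid into a single string
--     result = "\n"
--     result += "\n".join("".join(row) for row in grid)
--
--     return result
-- ===== SOURCE B (Python) =====
-- def concat_words_x(word1, word2):
--     # Sparse representation: per row collect the (position, char) marks, sort them,
--     # and emit the row as runs of spaces between marks -- no grid is allocated.
--     n = max(len(word1), len(word2))
--     rows = []
--     for i in range(n):
--         marks = []
--         if i < len(word1):
--             marks.append((i, word1[i]))
--         if i < len(word2) and not (i < len(word1) and n - 1 - i == i):
--             marks.append((n - 1 - i, word2[i]))
--         marks.sort(key=lambda t: t[0])
--         row = ''
--         prev = 0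
--         for p, c in marks:
--             row += ' ' * (p - prev) + c
--             prev = p + 1
--         row += ' ' * (n - prev)
--         rows.append(row)
--     return '\n' + '\n'.join(rows)
-- ===== Notes on version B (the rewrite author's own statement) =====
-- stated objective: alternative
-- what changed: B replaces the mutable max_len x max_len character grid with a sparse representation: each row collects its at-most-two (position, char) marks (dropping word2's mark when word1 overwrites the shared centre cell), sorts them, and emits the row as runs of spaces between marks.
import Mathlib
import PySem

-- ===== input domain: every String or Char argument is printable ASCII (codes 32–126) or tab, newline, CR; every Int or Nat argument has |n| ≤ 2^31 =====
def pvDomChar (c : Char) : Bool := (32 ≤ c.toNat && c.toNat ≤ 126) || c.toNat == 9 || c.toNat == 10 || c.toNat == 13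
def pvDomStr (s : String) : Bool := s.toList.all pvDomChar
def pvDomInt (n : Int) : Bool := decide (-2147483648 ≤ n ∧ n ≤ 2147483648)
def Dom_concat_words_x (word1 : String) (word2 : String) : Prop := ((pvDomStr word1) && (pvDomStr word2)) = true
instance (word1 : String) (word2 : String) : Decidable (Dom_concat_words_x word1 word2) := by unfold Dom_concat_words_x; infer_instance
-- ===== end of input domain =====

-- B uses a sparse representation: per row it collects the at-most-two (position, char) marks,
-- sorts them, and emits the row as runs of spaces between marks — no grid is allocated or
-- mutated (objective: alternative/simpler decomposition).

-- ===== PORT A =====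
-- grid0 = [[' ']*max_len]*max_len; two placement loops mutate it (List.set = in-place item assignment);
-- finally "\n" + "\n".join("".join(row)) ported via String.mk / String.intercalate (exact on char lists).
def concat_words_x (word1 : String) (word2 : String) : String :=
  let w1 := word1.toList
  let w2 := word2.toList
  let max_len := max w1.length w2.length
  let grid0 := List.replicate max_len (List.replicate max_len ' ')
  let grid1 := (List.range w2.length).foldl
    (fun g i => g.set i ((g.getD i []).set (max_len - 1 - i) (w2.getD i ' '))) grid0
  let grid2 := (List.range w1.length).foldl
    (fun g i => g.set i ((g.getD i []).set i (w1.getD i ' '))) grid1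
  "\n" ++ String.intercalate "\n" (grid2.map (fun row => String.mk row))

-- ===== PORT B =====
-- the marks of row i: (i, word1[i]) if in range, and (n-1-i, word2[i]) if in range and not
-- overwritten by word1 at the shared centre cell (same guards as Source B)
def pvMarks (w1 w2 : List Char) (n i : Nat) : List (Nat × Char) :=
  (if i < w1.length then [(i, w1.getD i ' ')] else []) ++
  (if i < w2.length ∧ ¬ (i < w1.length ∧ n - 1 - i = i) then [(n - 1 - i, w2.getD i ' ')] else [])

-- row += ' '*(p-prev) + c loop over the sorted marks, then the trailing ' '*(n-prev)
def pvEmitRow (n : Nat) (marks : List (Nat × Char)) : List Char :=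
  let s := marks.foldl (fun (s : List Char × Nat) pc =>
      (s.1 ++ List.replicate (pc.1 - s.2) ' ' ++ [pc.2], pc.1 + 1)) ([], 0)
  s.1 ++ List.replicate (n - s.2) ' '

def concat_words_x_alt (word1 : String) (word2 : String) : String :=
  let w1 := word1.toList
  let w2 := word2.toList
  let n := max w1.length w2.length
  let rows := (List.range n).map (fun i =>
    String.mk (pvEmitRow n (PySem.List.sorted (pvMarks w1 w2 n i) (fun t => t.1) false)))
  "\n" ++ String.intercalate "\n" rows

-- ===== PRECONDITION & SPEC =====
def Spec_concat_words_x (word1 : String) (word2 : String) (out : String) : Prop := out = concat_words_x_alt word1 word2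
instance (word1 : String) (word2 : String) (out : String) : Decidable (Spec_concat_words_x word1 word2 out) := by unfold Spec_concat_words_x; infer_instance

-- ===== CLAIM (what is proved, stated in full; the proofs are below) =====
def Claim_equal_concat_words_x : Prop := ∀ (word1 : String) (word2 : String), Dom_concat_words_x word1 word2 → Spec_concat_words_x word1 word2 (concat_words_x word1 word2)

-- ===== LEMMAS AND PROOFS =====

-- proof-side helper: row i of A's finished grid (spaces, word2's cell set, then word1's cell set)
def pvRowA (w1 w2 : List Char) (n i : Nat) : List Char :=
  if i < w1.length then
    (if i < w2.length then (List.replicate n ' ').set (n - 1 - i) (w2.getD i ' ')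
     else List.replicate n ' ').set i (w1.getD i ' ')
  else
    (if i < w2.length then (List.replicate n ' ').set (n - 1 - i) (w2.getD i ' ')
     else List.replicate n ' ')

-- length of the grid is preserved by a placement pass
lemma pvFold_length (f : Nat → Nat) (w : List Char) (m : Nat) (g : List (List Char)) :
    ((List.range m).foldl (fun g i => g.set i ((g.getD i []).set (f i) (w.getD i ' '))) g).length
      = g.length := by
  induction m generalizing g with
  | zero => simp
  | succ m ih =>
    rw [List.range_succ, List.foldl_append]
    simp only [List.foldl_cons, List.foldl_nil, List.length_set]
    exact ih g

-- row j after a placement pass over range m: row j of g with cell f j overwritten, iff j < m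
lemma pvFold_getD (f : Nat → Nat) (w : List Char) (m : Nat) (g : List (List Char)) (j : Nat) :
    ((List.range m).foldl (fun g i => g.set i ((g.getD i []).set (f i) (w.getD i ' '))) g).getD j []
      = if j < m then (g.getD j []).set (f j) (w.getD j ' ') else g.getD j [] := by
  induction m generalizing j with
  | zero => simp
  | succ m ih =>
    rw [List.range_succ, List.foldl_append]
    simp only [List.foldl_cons, List.foldl_nil]
    have hlen := pvFold_length f w m g
    have hRm : ((List.range m).foldl (fun g i => g.set i ((g.getD i []).set (f i) (w.getD i ' '))) g).getD m []
        = g.getD m [] := by rw [ih]; simp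
    rw [List.getD_eq_getElem?_getD, List.getElem?_set, hlen]
    by_cases hmj : m = j
    · subst hmj
      by_cases hin : m < g.length
      · rw [if_pos rfl, if_pos hin, Option.getD_some, hRm, if_pos (Nat.lt_succ_self m)]
      · have h1 : g.getD m [] = [] := by
          rw [List.getD_eq_getElem?_getD, List.getElem?_eq_none (by omega)]; rfl
        simp [hin]
    · rw [if_neg hmj, ← List.getD_eq_getElem?_getD, ih]
      by_cases hjm : j < m
      · simp [hjm, Nat.lt_succ_of_lt hjm]
      · have hjm1 : ¬ j < m + 1 := by omega
        simp [hjm, hjm1]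

-- the grid after both passes is exactly the list of A's rows
lemma pvGrid_eq (w1 w2 : List Char) :
    ((List.range w1.length).foldl (fun g i => g.set i ((g.getD i []).set i (w1.getD i ' ')))
       ((List.range w2.length).foldl
         (fun g i => g.set i ((g.getD i []).set (max w1.length w2.length - 1 - i) (w2.getD i ' ')))
         (List.replicate (max w1.length w2.length) (List.replicate (max w1.length w2.length) ' '))))
      = (List.range (max w1.length w2.length)).map (fun i => pvRowA w1 w2 (max w1.length w2.length) i) := by
  apply List.ext_getElem
  · rw [pvFold_length, pvFold_length]; simp
  · intro j hj hj'
    have hjn : j < max w1.length w2.length := by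
      rw [pvFold_length, pvFold_length, List.length_replicate] at hj; exact hj
    have hget : ∀ (L : List (List Char)) (h : j < L.length), L[j] = L.getD j [] :=
      fun L h => (List.getD_eq_getElem L [] h).symm
    rw [hget _ hj, pvFold_getD, pvFold_getD]
    have h0 : (List.replicate (max w1.length w2.length) (List.replicate (max w1.length w2.length) ' ')).getD j []
        = List.replicate (max w1.length w2.length) ' ' := by
      rw [List.getD_eq_getElem?_getD, List.getElem?_replicate_of_lt hjn]; rfl
    rw [h0]
    simp only [List.getElem_map, List.getElem_range]
    unfold pvRowA
    split_ifs <;> rfl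

-- one set on a run of spaces, as segments
lemma pvSetRep (n p : Nat) (c : Char) (h : p < n) :
    (List.replicate n ' ').set p c
      = List.replicate p ' ' ++ c :: List.replicate (n - (p + 1)) ' ' := by
  rw [List.set_eq_take_append_cons_drop, if_pos (by simpa using h)]
  simp [List.take_replicate, List.drop_replicate, Nat.min_eq_left h.le]

-- two sets at distinct cells p < q on a run of spaces, as segments
lemma pvSetSetRep (n p q : Nat) (c d : Char) (hpq : p < q) (hq : q < n) :
    ((List.replicate n ' ').set q d).set p c
      = List.replicate p ' ' ++ c ::
          (List.replicate (q - (p + 1)) ' ' ++ d :: List.replicate (n - (q + 1)) ' ') := by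
  rw [pvSetRep n q d hq, List.set_append_left _ _ (by simpa using hpq), pvSetRep q p c hpq]
  simp

-- B's emitted row equals A's set-based row, for every row index i < n
lemma pvRow_eq (w1 w2 : List Char) (n i : Nat) (hi : i < n) :
    pvEmitRow n (PySem.List.sorted (pvMarks w1 w2 n i) (fun t => t.1) false)
      = pvRowA w1 w2 n i := by
  have hq : n - 1 - i < n := by omega
  have hone : ∀ (x : Nat × Char), PySem.List.sorted [x] (fun t : Nat × Char => t.1) false = [x] :=
    fun x => PySem.List.sorted_eq_self_of_pairwise _ _ (by simp)
  unfold pvMarks pvRowA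
  by_cases h1 : i < w1.length <;> by_cases h2 : i < w2.length
  · by_cases hc : n - 1 - i = i
    · -- single mark: word1 overwrites word2 at the centre cell
      rw [if_pos h1, if_neg (by tauto), if_pos h1, if_pos h2, hc, List.set_set,
        pvSetRep n i _ hi]
      simp [pvEmitRow, hone]
    · rw [if_pos h1, if_pos ⟨h2, by tauto⟩, if_pos h1, if_pos h2]
      rcases Nat.lt_or_ge i (n - 1 - i) with hlt | hge
      · rw [PySem.List.sorted_eq_self_of_pairwise _ _ (by simp [hlt.le]),
          pvSetSetRep n i (n - 1 - i) _ _ hlt hq]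
        simp [pvEmitRow]
      · have hlt : n - 1 - i < i := by omega
        have hsw : PySem.List.sorted [(i, w1.getD i ' '), (n - 1 - i, w2.getD i ' ')]
            (fun t : Nat × Char => t.1) false
            = [(n - 1 - i, w2.getD i ' '), (i, w1.getD i ' ')] := by
          apply PySem.List.sorted_eq_of_perm_of_pairwise_lt
          · exact List.Perm.swap _ _ _
          · simp [hlt]
        simp only [List.singleton_append]
        rw [hsw, List.set_comm _ _ (by omega : (n-1-i : Nat) ≠ i), pvSetSetRep n (n - 1 - i) i _ _ hlt hi]
        simp [pvEmitRow]
  · rw [if_pos h1, if_neg (by tauto), if_pos h1, if_neg h2, pvSetRep n i _ hi]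
    simp [pvEmitRow, hone]
  · rw [if_neg h1, if_pos ⟨h2, by tauto⟩, if_neg h1, if_pos h2, pvSetRep n _ _ hq]
    simp [pvEmitRow, hone]
  · rw [if_neg h1, if_neg (by tauto), if_neg h1, if_neg h2]
    simp [pvEmitRow, PySem.List.sorted]

-- ===== VERDICT (by name: the statement is the Claim_ definition above) =====
theorem concat_words_x_spec : Claim_equal_concat_words_x := by
  intro word1 word2 _
  unfold Spec_concat_words_x concat_words_x concat_words_x_alt
  simp only []
  rw [pvGrid_eq word1.toList word2.toList, List.map_map]
  congr 1
  apply congrArg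
  apply List.map_congr_left
  intro i hi
  rw [Function.comp_apply, pvRow_eq _ _ _ _ (List.mem_range.mp hi)]
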